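-- pv_equiv track=rewrite | github.com/RajkumarYadav777/DSAlgo | STRINGS/REVERSEALNUMS/pattern.py | rev_only_alnum
-- ===== SOURCE A (Python) =====
-- def rev_only_alnum(s):
--     l = 0
--     r = len(s)-1
--     lst = list(s)
--
--     while l < r:
--
--         if not lst[l].isalnum():
--             l += 1
--
--         elif not lst[r].isalnum():
--             r -= 1
--
--         else:
--             lst[l], lst[r] = lst[r], lst[l]
--             l += 1
--             r -= 1
--     return ''.join(lst)
-- ===== SOURCE B (Python) =====
-- def rev_only_alnum(s):
--     rev = [c for c in s if c.isalnum()][::-1]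
--     out = []
--     i = 0
--     for c in s:
--         if c.isalnum():
--             out.append(rev[i])
--             i += 1
--         else:
--             out.append(c)
--     return ''.join(out)
-- ===== Notes on version B (the rewrite author's own statement) =====
-- stated objective: simpler
-- what changed: Replaced the two-converging-pointers in-place swap loop by a filter pass collecting the alphanumeric characters followed by one forward rebuild pass that substitutes them in reversed order.
import Mathlib
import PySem

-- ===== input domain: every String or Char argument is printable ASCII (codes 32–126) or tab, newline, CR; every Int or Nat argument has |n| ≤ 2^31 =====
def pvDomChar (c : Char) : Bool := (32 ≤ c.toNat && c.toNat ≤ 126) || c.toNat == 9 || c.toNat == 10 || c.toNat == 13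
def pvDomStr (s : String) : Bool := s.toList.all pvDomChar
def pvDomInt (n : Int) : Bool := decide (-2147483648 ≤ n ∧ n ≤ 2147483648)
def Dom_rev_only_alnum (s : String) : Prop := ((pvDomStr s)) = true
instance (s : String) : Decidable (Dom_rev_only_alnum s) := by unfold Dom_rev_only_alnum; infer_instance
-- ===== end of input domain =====

-- B replaces A's two-converging-pointers in-place swap loop by a filter pass plus one
-- forward rebuild pass substituting the collected alphanumerics in reversed order (objective: simpler).

-- ===== PORT A =====
-- the while loop: state is the char list and the two indices; index reads via pyGet?
-- (always in range on the reachable states; the `| _, _ => lst` arm is an unreachable totality guard)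
def revLoopA (lst : List Char) (l r : Int) : List Char :=
  if _h : l < r then
    match PySem.List.pyGet? lst l, PySem.List.pyGet? lst r with
    | some cl, some cr =>
      if ¬ PySem.Chars.isalnum cl then revLoopA lst (l + 1) r
      else if ¬ PySem.Chars.isalnum cr then revLoopA lst l (r - 1)
      else revLoopA ((lst.set l.toNat cr).set r.toNat cl) (l + 1) (r - 1)
    | _, _ => lst
  else lst
termination_by (r - l).toNat
decreasing_by all_goals omega

def rev_only_alnum (s : String) : String :=
  String.ofList (revLoopA s.toList 0 ((s.toList.length : Int) - 1))

-- ===== PORT B =====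
-- the forward rebuild pass: `rev[i]` consumption ported as front-consumption of the stack
-- (the `[]` arm is an unreachable IndexError totality guard)
def bSub (t : List Char) (xs : List Char) : List Char :=
  match xs with
  | [] => []
  | c :: cs =>
    if PySem.Chars.isalnum c then
      match t with
      | x :: ts => x :: bSub ts cs
      | [] => c :: bSub [] cs
    else c :: bSub t cs

def rev_only_alnum_alt (s : String) : String :=
  String.ofList (bSub ((s.toList.filter PySem.Chars.isalnum).reverse) s.toList)

-- ===== PRECONDITION & SPEC =====
def Spec_rev_only_alnum (s : String) (out : String) : Prop := out = rev_only_alnum_alt s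
instance (s : String) (out : String) : Decidable (Spec_rev_only_alnum s out) := by unfold Spec_rev_only_alnum; infer_instance

-- ===== CLAIM (what is proved, stated in full; the proofs are below) =====
def Claim_equal_rev_only_alnum : Prop := ∀ (s : String), Dom_rev_only_alnum s → Spec_rev_only_alnum s (rev_only_alnum s)

-- ===== LEMMAS AND PROOFS =====

lemma bSub_nil_t (xs : List Char) : bSub [] xs = xs := by
  induction xs with
  | nil => rfl
  | cons c cs ih => simp [bSub, ih]

lemma bSub_append (u v t : List Char) :
    bSub t (u ++ v) = bSub t u ++ bSub (t.drop (u.countP (fun c => PySem.Chars.isalnum c))) v := by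
  induction u generalizing t with
  | nil => simp [bSub]
  | cons c cs ih =>
    by_cases hc : PySem.Chars.isalnum c
    · cases t with
      | nil => simp [bSub, hc, ih]
      | cons x ts => simp [bSub, hc, ih]
    · simp [bSub, hc, ih]

lemma bSub_extend (u t t' : List Char)
    (h : u.countP (fun c => PySem.Chars.isalnum c) ≤ t.length) :
    bSub (t ++ t') u = bSub t u := by
  induction u generalizing t with
  | nil => rfl
  | cons c cs ih =>
    by_cases hc : PySem.Chars.isalnum c
    · cases t with
      | nil => simp [hc] at h
      | cons x ts =>
        simp only [List.countP_cons, hc, if_pos, List.length_cons] at h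
        simp [bSub, hc, ih ts (by omega)]
    · simp [bSub, hc, ih t (by simpa [List.countP_cons, hc] using h)]

lemma length_rev_filter (xs : List Char) :
    ((xs.filter PySem.Chars.isalnum).reverse).length
      = xs.countP (fun c => PySem.Chars.isalnum c) := by
  simp [List.countP_eq_length_filter]

-- the main invariant: the loop on pre ++ xs ++ suf with pointers framing xs rebuilds
-- pre and suf unchanged and performs B's substitution on xs
lemma revLoopA_eq : ∀ (n : Nat) (xs pre suf : List Char), xs.length = n →
    revLoopA (pre ++ xs ++ suf) (pre.length : Int) ((pre.length : Int) + xs.length - 1)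
      = pre ++ bSub ((xs.filter PySem.Chars.isalnum).reverse) xs ++ suf := by
  intro n
  induction n using Nat.strong_induction_on with
  | _ n ih =>
    intro xs pre suf hlen
    match xs with
    | [] => rw [revLoopA]; simp [bSub]
    | [c] =>
      rw [revLoopA]
      rw [dif_neg (by simp)]
      cases hh : PySem.Chars.isalnum c <;> simp [bSub, hh]
    | c :: b :: cs =>
      have hne : (b :: cs) ≠ [] := by simp
      obtain ⟨ys, d, hsplit⟩ : ∃ ys d, b :: cs = ys ++ [d] :=
        ⟨(b :: cs).dropLast, (b :: cs).getLast hne, (List.dropLast_append_getLast hne).symm⟩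
      have hxs : c :: b :: cs = c :: ys ++ [d] := by rw [hsplit]; simp
      have hclen : cs.length = ys.length := by
        have := congrArg List.length hsplit; simp at this; omega
      have hlr : (pre.length : Int) < (pre.length : Int) + (c :: b :: cs).length - 1 := by
        simp; omega
      have hget_l : PySem.List.pyGet? (pre ++ (c :: b :: cs) ++ suf) (pre.length : Int) = some c := by
        rw [PySem.List.pyGet?_natCast]
        rw [List.append_assoc, List.getElem?_append_right (le_refl _)]
        simp
      have hget_r : PySem.List.pyGet? (pre ++ (c :: b :: cs) ++ suf)
          ((pre.length : Int) + (c :: b :: cs).length - 1) = some d := by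
        have : ((pre.length : Int) + (c :: b :: cs).length - 1)
            = ((pre.length + (c :: b :: cs).length - 1 : Nat) : Int) := by
          simp; omega
        rw [this, PySem.List.pyGet?_natCast]
        rw [List.append_assoc, List.getElem?_append_right (by simp)]
        rw [List.getElem?_append_left (by simp)]
        have h2 : pre.length + (c :: b :: cs).length - 1 - pre.length
            = (c :: b :: cs).length - 1 := by omega
        rw [h2, ← List.getLast?_eq_getElem?, hsplit, ← List.cons_append]
        exact List.getLast?_concat
      rw [revLoopA]
      rw [dif_pos hlr, hget_l, hget_r]
      by_cases hc : PySem.Chars.isalnum c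
      · by_cases hdal : PySem.Chars.isalnum d
        · -- swap: both ends alphanumeric
          simp only [hc, hdal, not_true_eq_false, if_false]
          have hset : (((pre ++ (c :: b :: cs) ++ suf).set (pre.length : Int).toNat d).set
                ((pre.length : Int) + (c :: b :: cs).length - 1).toNat c)
              = (pre ++ [d]) ++ ys ++ ([c] ++ suf) := by
            have h1 : ((pre.length : Int)).toNat = pre.length := by omega
            have h2 : (((pre.length : Int)) + (c :: b :: cs).length - 1).toNat
                = pre.length + 1 + ys.length := by simp; omega
            rw [h1, h2]
            have hL : pre ++ (c :: b :: cs) ++ suf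
                = pre ++ (c :: (ys ++ ([d] ++ suf))) := by rw [hxs]; simp
            rw [hL, List.set_append, if_neg (lt_irrefl _)]
            simp only [Nat.sub_self, List.set_cons_zero]
            have hL2 : pre ++ d :: (ys ++ ([d] ++ suf))
                = (pre ++ d :: ys) ++ ([d] ++ suf) := by simp
            rw [hL2, List.set_append, if_neg (by simp; omega)]
            have h3 : pre.length + 1 + ys.length - (pre ++ d :: ys).length = 0 := by simp; omega
            rw [h3, List.singleton_append, List.set_cons_zero]
            simp
          rw [hset]
          have hIH := ih ys.length (by simp at hlen; omega) ys (pre ++ [d]) ([c] ++ suf) rfl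
          have hi1 : ((pre.length : Int)) + 1 = ((pre ++ [d]).length : Int) := by simp
          have hi2 : (pre.length : Int) + (c :: b :: cs).length - 1 - 1
              = ((pre ++ [d]).length : Int) + ys.length - 1 := by simp; omega
          rw [hi1, hi2, hIH]
          -- B's side
          have hfil : ((c :: b :: cs).filter PySem.Chars.isalnum)
              = c :: (ys.filter PySem.Chars.isalnum) ++ [d] := by
            rw [hxs]; simp [List.filter_append, hc, hdal]
          rw [hfil, hsplit]
          have hrev : (c :: ys.filter PySem.Chars.isalnum ++ [d]).reverse
              = d :: ((ys.filter PySem.Chars.isalnum).reverse ++ [c]) := by simp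
          rw [hrev]
          simp only [bSub, hc, if_pos]
          rw [bSub_append]
          rw [bSub_extend ys _ [c] (by rw [← length_rev_filter])]
          have hdrop : ((ys.filter PySem.Chars.isalnum).reverse ++ [c]).drop
              (ys.countP (fun c => PySem.Chars.isalnum c)) = [c] := by
            rw [← length_rev_filter, List.drop_append_of_le_length (le_refl _)]
            simp
          rw [hdrop]
          simp [bSub, hdal]
        · -- right end not alphanumeric
          simp only [hc, hdal, not_true_eq_false, if_false, Bool.false_eq_true]
          have hx : pre ++ (c :: b :: cs) ++ suf = pre ++ (c :: ys) ++ ([d] ++ suf) := by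
            rw [hxs]; simp
          have harg : (pre.length : Int) + (c :: b :: cs).length - 1 - 1
              = (pre.length : Int) + (c :: ys).length - 1 := by simp; omega
          rw [hx, harg]
          have hIH := ih (c :: ys).length (by simp at hlen ⊢; omega) (c :: ys) pre ([d] ++ suf) rfl
          rw [hIH]
          have hfil : ((c :: ys ++ [d]).filter PySem.Chars.isalnum)
              = ((c :: ys).filter PySem.Chars.isalnum) := by
            simp [List.filter_cons, List.filter_append, hdal]
          rw [show c :: b :: cs = c :: ys ++ [d] from hxs, hfil, bSub_append]
          have hdrop : ((c :: ys).filter PySem.Chars.isalnum).reverse.drop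
              ((c :: ys).countP (fun c => PySem.Chars.isalnum c)) = [] := by
            rw [List.drop_eq_nil_iff, length_rev_filter]
          rw [hdrop]
          simp [bSub, hdal, bSub_nil_t]
      · -- left end not alphanumeric
        simp only [hc]
        have hx : pre ++ (c :: b :: cs) ++ suf = (pre ++ [c]) ++ (b :: cs) ++ suf := by simp
        have harg : (pre.length : Int) + 1 = ((pre ++ [c]).length : Int) := by simp
        have harg2 : (pre.length : Int) + (c :: b :: cs).length - 1
            = ((pre ++ [c]).length : Int) + (b :: cs).length - 1 := by simp; omega
        rw [hx, harg, harg2]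
        have hIH := ih (b :: cs).length (by simp at hlen ⊢; omega) (b :: cs) (pre ++ [c]) suf rfl
        rw [hIH]
        simp [bSub, hc, List.filter_cons]

-- ===== VERDICT (by name: the statement is the Claim_ definition above) =====
theorem rev_only_alnum_spec : Claim_equal_rev_only_alnum := by
  intro s _
  unfold Spec_rev_only_alnum rev_only_alnum rev_only_alnum_alt
  have := revLoopA_eq s.toList.length s.toList [] [] rfl
  simp at this
  rw [show ((s.toList.length : Int)) = ((s.length : Int)) from by simp, this]
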